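-- pv_equiv track=rewrite | github.com/EDA-Teaching-RJH/assignment-foundations-of-programming-miss-b4teman | fleet_manager.py | calculate_payroll
-- ===== SOURCE A (Python) =====
-- def calculate_payroll(ranks):
--     total = 0
--     #Starting with 0
--     for r in ranks:
--         if r == "Captain":
--             total += 500
--         elif r == "Commander":
--             total += 300
--         else:
--             total += 200
--         #Adds 'pay' per diff ranks
--     return total
-- ===== SOURCE B (Python) =====
-- def calculate_payroll(ranks):
--     return 200 * len(ranks) + 300 * ranks.count("Captain") + 100 * ranks.count("Commander")
-- ===== Notes on version B (the rewrite author's own statement) =====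
-- stated objective: simpler
-- what changed: Replaced the per-element branching accumulator loop with a closed-form total computed from the list length and two category counts.
import Mathlib
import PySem

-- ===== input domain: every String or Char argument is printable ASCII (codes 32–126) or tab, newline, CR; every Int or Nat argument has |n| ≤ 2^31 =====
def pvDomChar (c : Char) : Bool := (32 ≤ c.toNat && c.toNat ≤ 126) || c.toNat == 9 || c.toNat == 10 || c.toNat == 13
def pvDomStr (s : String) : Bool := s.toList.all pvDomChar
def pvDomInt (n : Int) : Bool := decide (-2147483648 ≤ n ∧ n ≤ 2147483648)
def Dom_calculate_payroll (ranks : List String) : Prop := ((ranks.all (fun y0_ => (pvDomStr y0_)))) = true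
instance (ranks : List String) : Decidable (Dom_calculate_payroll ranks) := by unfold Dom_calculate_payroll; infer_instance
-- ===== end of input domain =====

-- B replaces A's branching accumulator loop with a closed-form total from the list length and two rank counts (simpler decomposition, same cost).


-- ===== PORT A =====
def calculate_payroll (ranks : List String) : Int :=
  ranks.foldl (fun total r =>
    if r == "Captain" then total + 500
    else if r == "Commander" then total + 300
    else total + 200) 0

-- ===== PORT B =====
def calculate_payroll_alt (ranks : List String) : Int :=
  200 * (ranks.length : Int) + 300 * (PySem.List.count ranks "Captain" : Int)
    + 100 * (PySem.List.count ranks "Commander" : Int)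

-- ===== PRECONDITION & SPEC =====
def Spec_calculate_payroll (ranks : List String) (out : Int) : Prop := out = calculate_payroll_alt ranks
instance (ranks : List String) (out : Int) : Decidable (Spec_calculate_payroll ranks out) := by unfold Spec_calculate_payroll; infer_instance

-- ===== CLAIM (what is proved, stated in full; the proofs are below) =====
def Claim_equal_calculate_payroll : Prop := ∀ (ranks : List String), Dom_calculate_payroll ranks → Spec_calculate_payroll ranks (calculate_payroll ranks)

-- ===== LEMMAS AND PROOFS =====

-- ===== VERDICT (by name: the statement is the Claim_ definition above) =====
theorem payroll_shift (ranks : List String) (t : Int) :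
    ranks.foldl (fun total r =>
      if r == "Captain" then total + 500
      else if r == "Commander" then total + 300
      else total + 200) t = t + calculate_payroll_alt ranks := by
  induction ranks generalizing t with
  | nil => simp [calculate_payroll_alt, PySem.List.count]
  | cons h tl ih =>
    simp only [List.foldl_cons, ih, calculate_payroll_alt, PySem.List.count, List.count_cons]
    by_cases h1 : h = "Captain"
    · simp [h1]; ring
    · by_cases h2 : h = "Commander"
      · simp [h2]; ring
      · simp [h1, h2]; ring

theorem calculate_payroll_spec : Claim_equal_calculate_payroll := by
  intro ranks _
  unfold Spec_calculate_payroll calculate_payroll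
  rw [payroll_shift]; ring
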